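-- pv_equiv track=rewrite | github.com/kemckai/Math-Tutor | tutor/step_validator.py | _looks_textual_step
-- ===== SOURCE A (Python) =====
-- def _looks_textual_step(step: str) -> bool:
--     s = (step or "").lower()
--     keywords = [
--         "domain", "asymptote", "function", "quotient", "remainder", "factor", "vertex",
--         "shift", "scale", "slope", "intercept", "log_", "composed", "f(", "g(",
--         " or ", "<", ">", "interval", "growth", "decay",
--     ]
--     return any(k in s for k in keywords)
-- ===== SOURCE B (Python) =====
-- _KEYWORDS = [
--     "domain", "asymptote", "function", "quotient", "remainder", "factor", "vertex",
--     "shift", "scale", "slope", "intercept", "log_", "composed", "f(", "g(",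
--     " or ", "<", ">", "interval", "growth", "decay",
-- ]
--
-- def _looks_textual_step(step: str) -> bool:
--     s = (step or "").lower()
--     while s:
--         for k in _KEYWORDS:
--             if s.startswith(k):
--                 return True
--         s = s[1:]
--     return False
-- ===== Notes on version B (the rewrite author's own statement) =====
-- stated objective: alternative
-- what changed: A loops over keywords and runs a substring search for each; B makes one scan over string positions and at each position checks whether any keyword starts there (transposed traversal).
import Mathlib
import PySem

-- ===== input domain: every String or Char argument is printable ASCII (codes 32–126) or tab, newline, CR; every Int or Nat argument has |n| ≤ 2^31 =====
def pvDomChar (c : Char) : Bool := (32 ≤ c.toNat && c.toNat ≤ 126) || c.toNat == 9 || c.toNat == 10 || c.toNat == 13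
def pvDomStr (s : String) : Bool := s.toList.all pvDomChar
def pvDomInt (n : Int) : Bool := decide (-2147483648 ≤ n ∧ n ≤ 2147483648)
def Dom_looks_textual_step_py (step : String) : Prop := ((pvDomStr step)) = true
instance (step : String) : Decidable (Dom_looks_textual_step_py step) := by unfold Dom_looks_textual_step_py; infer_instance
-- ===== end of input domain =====

-- B replaces A's per-keyword substring searches with one scan over string positions,
-- checking at each position whether any keyword starts there (alternative, same cost).

-- ===== PORT A =====
-- A: s = (step or "").lower(); return any(k in s for k in keywords)
def looks_textual_step_py (step : String) : Bool :=
  let s := PySem.Str.lower (if step == "" then "" else step)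
  (["domain", "asymptote", "function", "quotient", "remainder", "factor", "vertex",
    "shift", "scale", "slope", "intercept", "log_", "composed", "f(", "g(",
    " or ", "<", ">", "interval", "growth", "decay"] : List String).any
    (fun k => PySem.Str.isIn k s)

-- ===== PORT B =====
def pvBKeywords : List String :=
  ["domain", "asymptote", "function", "quotient", "remainder", "factor", "vertex",
   "shift", "scale", "slope", "intercept", "log_", "composed", "f(", "g(",
   " or ", "<", ">", "interval", "growth", "decay"]

-- B's loop: while s: if any keyword starts the current suffix return True; s = s[1:]
def pvBScan : List Char → Bool
  | [] => false
  | c :: rest =>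
    (pvBKeywords.any (fun k => PySem.Chars.startswith (c :: rest) k.toList)) || pvBScan rest

def looks_textual_step_py_alt (step : String) : Bool :=
  pvBScan (PySem.Chars.lower ((if step == "" then "" else step).toList))

-- ===== PRECONDITION & SPEC =====
def Spec_looks_textual_step_py (step : String) (out : Bool) : Prop := out = looks_textual_step_py_alt step
instance (step : String) (out : Bool) : Decidable (Spec_looks_textual_step_py step out) := by unfold Spec_looks_textual_step_py; infer_instance

-- ===== CLAIM (what is proved, stated in full; the proofs are below) =====
def Claim_equal_looks_textual_step_py : Prop := ∀ (step : String), Dom_looks_textual_step_py step → Spec_looks_textual_step_py step (looks_textual_step_py step)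

-- ===== LEMMAS AND PROOFS =====

-- B's scan finds a match iff some keyword is a prefix of some suffix of the string.
lemma pvBScan_iff (L : List Char) :
    pvBScan L = true ↔ ∃ j, ∃ k ∈ pvBKeywords, k.toList <+: L.drop j := by
  induction L with
  | nil =>
    simp only [pvBScan]
    constructor
    · intro h; exact absurd h (by simp)
    · rintro ⟨j, k, hk, hp⟩
      rw [List.drop_nil] at hp
      have hne : k.toList ≠ [] := by
        revert hk; unfold pvBKeywords; intro hk
        fin_cases hk <;> decide
      exact absurd (List.prefix_nil.mp hp) hne
  | cons c rest ih =>
    simp only [pvBScan, Bool.or_eq_true, List.any_eq_true, PySem.Chars.startswith_iff, ih]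
    constructor
    · rintro (⟨k, hk, hp⟩ | ⟨j, k, hk, hp⟩)
      · exact ⟨0, k, hk, hp⟩
      · exact ⟨j + 1, k, hk, by simpa using hp⟩
    · rintro ⟨j, k, hk, hp⟩
      cases j with
      | zero => exact Or.inl ⟨k, hk, hp⟩
      | succ j => exact Or.inr ⟨j, k, hk, by simpa using hp⟩

-- A's any-of-isIn over the same lowered string, characterised the same way.
lemma pvA_iff (ks : List String) (L : List Char) :
    ks.any (fun k => PySem.Chars.isIn k.toList L) = true ↔
      ∃ j, ∃ k ∈ ks, k.toList <+: L.drop j := by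
  simp only [List.any_eq_true]
  constructor
  · rintro ⟨k, hk, h⟩
    obtain ⟨j, hj⟩ := (PySem.Chars.exists_prefix_drop_iff_isIn k.toList L).mpr h
    exact ⟨j, k, hk, hj⟩
  · rintro ⟨j, k, hk, hj⟩
    exact ⟨k, hk, (PySem.Chars.exists_prefix_drop_iff_isIn k.toList L).mp ⟨j, hj⟩⟩

-- ===== VERDICT (by name: the statement is the Claim_ definition above) =====
theorem looks_textual_step_py_spec : Claim_equal_looks_textual_step_py := by
  intro step _
  unfold Spec_looks_textual_step_py looks_textual_step_py looks_textual_step_py_alt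
  simp only [PySem.Str.isIn_eq, PySem.Str.toList_lower]
  rw [Bool.eq_iff_iff, pvBScan_iff]
  exact pvA_iff pvBKeywords (PySem.Chars.lower ((if step == "" then "" else step).toList))
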